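-- pv_equiv track=rewrite | github.com/sschott20/Competitive-Programming | Codeforces Round 891 (Div. 3)/MaximumRounding.py | solve
-- ===== SOURCE A (Python) =====
-- def solve(test):
--     zeros = 0
--     test = [int(x) for x in str(test)]
--     test.reverse()
--     i = 0
--     while i < len(test):
--         if test[i] <= 4:
--             i += 1
--         elif test[i] >= 5:
--             if i >= len(test) - 1:
--                 test.append(0)
--                 zeros = i + 1
--             else:
--                 i += 1
--                 while test[i] == 9:
--                     i += 1
--                     if i >= len(test):
--                         test.append(0)
--                         zeros = i
--                         break
--                 test[i] += 1
--                 zeros = i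
--     for i in range(0, zeros):
--         test[i] = 0
--     test.reverse()
--     test = [str(x) for x in test]
--
--     return int("".join(test))
-- ===== SOURCE B (Python) =====
-- def solve(test):
--     digits = [int(x) for x in str(test)]
--     digits.reverse()
--     carry = 0
--     zeros = 0
--     for i in range(len(digits)):
--         d = digits[i] + carry
--         if d >= 5:
--             carry = 1
--             zeros = i + 1
--         else:
--             digits[i] = d
--             carry = 0
--     if carry:
--         digits.append(1)
--     for i in range(zeros):
--         digits[i] = 0
--     digits.reverse()
--     return int("".join(str(x) for x in digits))
-- ===== Notes on version B (the rewrite author's own statement) =====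
-- stated objective: simpler
-- what changed: A's nested while loops with mid-loop appends and index re-scanning (re-rounding after every cascade) are replaced by one flat left-to-right pass with a carry flag and a zeros boundary, plus a single trailing-carry append.
import Mathlib
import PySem

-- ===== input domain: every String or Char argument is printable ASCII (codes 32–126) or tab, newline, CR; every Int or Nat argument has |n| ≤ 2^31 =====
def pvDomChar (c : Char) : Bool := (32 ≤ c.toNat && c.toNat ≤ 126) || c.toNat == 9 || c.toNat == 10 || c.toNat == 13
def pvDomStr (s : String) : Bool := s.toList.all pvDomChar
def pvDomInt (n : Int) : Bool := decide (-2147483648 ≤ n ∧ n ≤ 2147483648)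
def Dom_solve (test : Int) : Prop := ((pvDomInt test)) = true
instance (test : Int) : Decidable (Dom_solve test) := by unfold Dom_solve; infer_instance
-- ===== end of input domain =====

-- B replaces A's nested while loops (with mid-loop appends and index re-scanning) by one flat
-- left-to-right carry pass; same digit extraction and final join, so exception behaviour matches.

-- ===== PORT A =====

-- int(x) for a single character x; exact on digit characters (the only ones reached under Pre_)
def pvCharInt (c : Char) : Int := (PySem.Int.ofStr? (String.ofList [c])).getD 0

-- shared by both Pythons verbatim: [int(x) for x in str(test)]; .reverse()
def digitsOf (test : Int) : List Int :=
  ((PySem.Int.toStr test).toList.map pvCharInt).reverse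

-- A's inner `while test[i] == 9: i += 1; if i >= len: append 0; zeros=i; break`
-- (fuel is an upper bound on the scan length; t.length always suffices)
def innerA : Nat → List Int → Nat → List Int × Nat
  | 0, t, i => (t, i)
  | F+1, t, i =>
    if t.getD i 0 == 9 then
      if t.length ≤ i + 1 then (t ++ [0], i + 1)
      else innerA F t (i+1)
    else (t, i)

-- A's outer while loop; state (test, i, zeros)
def loopA : Nat → List Int → Nat → Nat → List Int × Nat
  | 0, t, _, z => (t, z)
  | fuel+1, t, i, z =>
    if i < t.length then
      if t.getD i 0 ≤ 4 then loopA fuel t (i+1) z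
      else
        if t.length - 1 ≤ i then loopA fuel (t ++ [0]) i (i+1)
        else
          let p := innerA t.length t (i+1)
          loopA fuel ((p.1).set p.2 ((p.1).getD p.2 0 + 1)) p.2 p.2
    else (t, z)

-- shared by both Pythons verbatim: for i in range(zeros): test[i] = 0
def zeroPrefix (t : List Int) (z : Nat) : List Int :=
  (List.range z).foldl (fun acc j => acc.set j 0) t

-- shared by both Pythons verbatim: zero the prefix, reverse, join str(digit)s, int(...)
def finalize (t : List Int) (z : Nat) : Int :=
  (PySem.Int.ofStr? (PySem.Str.join "" ((zeroPrefix t z).reverse.map PySem.Int.toStr))).getD 0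

def solve (test : Int) : Int :=
  let ds := digitsOf test
  let p := loopA (3 * ds.length + 16) ds 0 0
  finalize p.1 p.2

-- ===== PORT B =====

-- B's single for-range pass with state (digits, carry, zeros); fuel = number of remaining indices
def loopB : Nat → List Int → Nat → Int → Nat → List Int × Int × Nat
  | 0, dig, _, c, z => (dig, c, z)
  | n+1, dig, i, c, z =>
    let d := dig.getD i 0 + c
    if 5 ≤ d then loopB n dig (i+1) 1 (i+1)
    else loopB n (dig.set i d) (i+1) 0 z

def solve_alt (test : Int) : Int :=
  let ds := digitsOf test
  let q := loopB ds.length ds 0 0 0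
  finalize (if q.2.1 ≠ 0 then q.1 ++ [1] else q.1) q.2.2

-- ===== PRECONDITION & SPEC =====
-- A raises ValueError on negative test (int('-')); Pre_ admits exactly the nonnegative inputs.
def Pre_solve (test : Int) : Prop := 0 ≤ test
instance (test : Int) : Decidable (Pre_solve test) := by unfold Pre_solve; infer_instance
def pvWitness_solve : Int := (7)

def Spec_solve (test : Int) (out : Int) : Prop := out = solve_alt test
instance (test : Int) (out : Int) : Decidable (Spec_solve test out) := by unfold Spec_solve; infer_instance

-- ===== CLAIM (what is proved, stated in full; the proofs are below) =====
def Claim_equal_solve : Prop := ∀ (test : Int), Dom_solve test → Pre_solve test → Spec_solve test (solve test)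

-- ===== LEMMAS AND PROOFS =====

-- B's state after the loop, with the trailing-carry append applied
def postB (q : List Int × Int × Nat) : List Int × Nat :=
  (if q.2.1 ≠ 0 then q.1 ++ [1] else q.1, q.2.2)

-- the two loop results produce the same finalize output: same zeros, same length,
-- same digits at positions ≥ zeros
def agreeR (p q : List Int × Nat) : Prop :=
  p.2 = q.2 ∧ p.1.length = q.1.length ∧ ∀ l, p.2 ≤ l → p.1.getD l 0 = q.1.getD l 0

theorem getD_set_eq (t : List Int) (i : Nat) (v : Int) (l : Nat) :
    (t.set i v).getD l 0 = if l = i ∧ i < t.length then v else t.getD l 0 := by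
  simp only [List.getD_eq_getElem?_getD, List.getElem?_set]
  split_ifs <;> simp_all

theorem getD_append_single (t : List Int) (v : Int) (l : Nat) :
    (t ++ [v]).getD l 0 = if l = t.length then v else t.getD l 0 := by
  rcases Nat.lt_trichotomy l t.length with h|h|h
  · rw [if_neg (by omega)]
    simp only [List.getD_eq_getElem?_getD, List.getElem?_append_left h]
  · subst h; simp [List.getD_eq_getElem?_getD]
  · rw [if_neg (by omega)]
    rw [List.getD_eq_getElem?_getD, List.getD_eq_getElem?_getD,
      List.getElem?_eq_none (by simp; omega), List.getElem?_eq_none (by omega)]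

theorem set_append_len (t : List Int) (v w : Int) : (t ++ [v]).set t.length w = t ++ [w] := by
  induction t with
  | nil => rfl
  | cons a t ih => simp [ih]

theorem zeroPrefix_succ (t : List Int) (z : Nat) :
    zeroPrefix t (z+1) = (zeroPrefix t z).set z 0 := by
  simp [zeroPrefix, List.range_succ]

theorem zeroPrefix_length (t : List Int) (z : Nat) : (zeroPrefix t z).length = t.length := by
  induction z with
  | zero => rfl
  | succ z ih => rw [zeroPrefix_succ, List.length_set, ih]

theorem zeroPrefix_getD (t : List Int) (z : Nat) (l : Nat) :
    (zeroPrefix t z).getD l 0 = if l < z then 0 else t.getD l 0 := by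
  induction z with
  | zero => simp [zeroPrefix]
  | succ z ih =>
    rw [zeroPrefix_succ, getD_set_eq, ih]
    split_ifs <;> first | rfl | omega |
      (rename_i hc h1 h2; rw [zeroPrefix_length] at hc; rw [List.getD_eq_default]; omega)

theorem finalize_congr (t1 t2 : List Int) (z : Nat)
    (hlen : t1.length = t2.length) (h : ∀ l, z ≤ l → t1.getD l 0 = t2.getD l 0) :
    finalize t1 z = finalize t2 z := by
  have hzp : zeroPrefix t1 z = zeroPrefix t2 z := by
    apply List.ext_getElem (by rw [zeroPrefix_length, zeroPrefix_length, hlen])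
    intro i h1 h2
    have e : (zeroPrefix t1 z).getD i 0 = (zeroPrefix t2 z).getD i 0 := by
      rw [zeroPrefix_getD, zeroPrefix_getD]
      split_ifs with hi
      · rfl
      · exact h i (by omega)
    rwa [List.getD_eq_getElem _ _ h1, List.getD_eq_getElem _ _ h2] at e
  unfold finalize
  rw [hzp]

-- the tail of A's loop after an append at the top: the carry lands in the appended cell
theorem afterAppend (f : Nat) (t' : List Int) (i : Nat) (hf : 3 ≤ f) (hi : i + 1 = t'.length)
    (h5 : 5 ≤ t'.getD i 0) :
    loopA f (t' ++ [0]) i (i+1) = (t' ++ [1], i+1) := by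
  obtain ⟨f1, rfl⟩ : ∃ f1, f = f1 + 1 := ⟨f - 1, by omega⟩
  rw [loopA]
  rw [if_pos (by simp; omega)]
  rw [if_neg (by rw [getD_append_single, if_neg (by omega)]; omega)]
  rw [if_neg (by simp; omega)]
  have e0 : (t' ++ [0]).getD (i+1) 0 = 0 := by rw [getD_append_single, if_pos hi]
  have einner : innerA (t' ++ [0]).length (t' ++ [0]) (i+1) = (t' ++ [0], i+1) := by
    obtain ⟨F1, hF⟩ : ∃ F1, (t' ++ [0]).length = F1 + 1 := ⟨t'.length, by simp⟩
    rw [hF, innerA, if_neg (by rw [e0]; decide)]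
  simp only [einner, e0]
  have eset : (t' ++ [0]).set (i+1) (0 + 1) = t' ++ [1] := by
    rw [hi]; exact set_append_len t' 0 1
  rw [eset]
  obtain ⟨f2, rfl⟩ : ∃ f2, f1 = f2 + 1 := ⟨f1 - 1, by omega⟩
  rw [loopA]
  rw [if_pos (by simp; omega)]
  rw [if_pos (by rw [getD_append_single, if_pos hi]; omega)]
  obtain ⟨f3, rfl⟩ : ∃ f3, f2 = f3 + 1 := ⟨f2 - 1, by omega⟩
  rw [loopA, if_neg (by simp; omega)]

theorem agree_append1 (t' dig : List Int) (hlen : t'.length = dig.length) :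
    agreeR (t' ++ [1], t'.length) (dig ++ [1], dig.length) := by
  refine ⟨hlen, by simp [hlen], ?_⟩
  intro l hl
  rw [getD_append_single, getD_append_single]
  rcases Nat.eq_or_lt_of_le hl with h|h
  · rw [if_pos h.symm, if_pos (by omega)]
  · rw [if_neg (by omega), if_neg (by omega), List.getD_eq_default _ _ (by omega),
      List.getD_eq_default _ _ (by omega)]

theorem postB_one (dig : List Int) (z : Nat) : postB (dig, 1, z) = (dig ++ [1], z) := by
  simp [postB]

theorem postB_zero (dig : List Int) (z : Nat) : postB (dig, 0, z) = (dig, z) := by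
  simp [postB]

-- the simulation: A's loop from an aligned state equals B's loop (plus carry append);
-- first component: aligned at A's loop top with carry 0; second: A inside the 9-scan, carry 1
theorem simAll (n : Nat) :
    (∀ (fuel : Nat) (dig : List Int) (i z : Nat) (t : List Int),
      i + n = dig.length → z ≤ i → n + 8 ≤ fuel →
      t.length = dig.length → (∀ l, z ≤ l → t.getD l 0 = dig.getD l 0) →
      agreeR (loopA fuel t i z) (postB (loopB n dig i 0 z)))
    ∧
    (∀ (F fuel : Nat) (dig : List Int) (j : Nat) (t : List Int),
      j + n = dig.length → 1 ≤ n → n ≤ F → n + 8 ≤ fuel →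
      t.length = dig.length → (∀ l, j ≤ l → t.getD l 0 = dig.getD l 0) →
      agreeR (loopA fuel (((innerA F t j).1).set (innerA F t j).2 (((innerA F t j).1).getD (innerA F t j).2 0 + 1)) (innerA F t j).2 (innerA F t j).2)
             (postB (loopB n dig j 1 j))) := by
  induction n using Nat.strong_induction_on with
  | _ n IH =>
  constructor
  · -- S1
    intro fuel dig i z t hin hz hfuel hlen hag
    obtain ⟨f, rfl⟩ : ∃ f, fuel = f + 1 := ⟨fuel - 1, by omega⟩
    rw [loopA]
    rcases Nat.eq_zero_or_pos n with hn0 | hn1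
    · -- n = 0 : loop over
      subst hn0
      rw [if_neg (by omega), loopB, postB_zero]
      exact ⟨rfl, hlen, hag⟩
    · obtain ⟨m, rfl⟩ : ∃ m, n = m + 1 := ⟨n - 1, by omega⟩
      rw [if_pos (by omega), loopB]
      have hti : t.getD i 0 = dig.getD i 0 := hag i hz
      simp only [add_zero]
      by_cases h4 : t.getD i 0 ≤ 4
      · -- digit ≤ 4: plain step
        rw [if_pos h4, if_neg (by omega)]
        refine (IH m (by omega)).1 f (dig.set i (dig.getD i 0)) (i+1) z t
          (by simp; omega) (by omega) (by omega) (by simp; omega) ?_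
        intro l hl
        rw [getD_set_eq]
        split_ifs with hset
        · obtain ⟨rfl, -⟩ := hset; exact hti
        · exact hag l hl
      · rw [if_neg h4]
        by_cases hlast : t.length - 1 ≤ i
        · -- last position: append chunk, n = 1
          have hi1 : i + 1 = t.length := by omega
          have hm0 : m = 0 := by omega
          subst hm0
          rw [if_pos hlast, if_pos (by omega), loopB, postB_one]
          rw [afterAppend f t i (by omega) hi1 (by omega)]
          have h := agree_append1 t dig hlen
          rwa [show t.length = i + 1 by omega, show dig.length = i + 1 by omega] at h
        · -- interior: enter the 9-scan with carry
          rw [if_neg hlast, if_pos (by omega)]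
          exact (IH m (by omega)).2 t.length f dig (i+1) t (by omega) (by omega)
            (by omega) (by omega) hlen (fun l hl => hag l (by omega))
  · -- S2
    intro F fuel dig j t hin h1 hF hfuel hlen hag
    obtain ⟨m, rfl⟩ : ∃ m, n = m + 1 := ⟨n - 1, by omega⟩
    obtain ⟨F', rfl⟩ : ∃ F1, F = F1 + 1 := ⟨F - 1, by omega⟩
    have htj : t.getD j 0 = dig.getD j 0 := hag j (le_refl j)
    rw [innerA]
    by_cases h9 : dig.getD j 0 = 9
    · rw [if_pos (by rw [htj, h9]; decide)]
      by_cases hend : t.length ≤ j + 1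
      · -- all 9s run to the end: append inside the scan, n = 1
        have hm0 : m = 0 := by omega
        subst hm0
        have hj1 : j + 1 = t.length := by omega
        rw [if_pos hend]
        show agreeR (loopA fuel ((t ++ [0]).set (j+1) ((t ++ [0]).getD (j+1) 0 + 1)) (j+1) (j+1))
          (postB (loopB (0+1) dig j 1 j))
        have e0 : (t ++ [0]).getD (j+1) 0 = 0 := by rw [getD_append_single, if_pos hj1]
        rw [e0]
        have eset : (t ++ [0]).set (j+1) (0 + 1) = t ++ [1] := by
          rw [hj1]; exact set_append_len t 0 1
        rw [eset]
        obtain ⟨f1, rfl⟩ : ∃ f1, fuel = f1 + 1 := ⟨fuel - 1, by omega⟩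
        rw [loopA, if_pos (by simp; omega)]
        rw [if_pos (by rw [getD_append_single, if_pos hj1]; omega)]
        obtain ⟨f2, rfl⟩ : ∃ f2, f1 = f2 + 1 := ⟨f1 - 1, by omega⟩
        rw [loopA, if_neg (by simp; omega)]
        rw [loopB, if_pos (by omega), loopB, postB_one]
        have h := agree_append1 t dig hlen
        rwa [show t.length = j + 1 by omega, show dig.length = j + 1 by omega] at h
      · -- scan one more 9
        rw [if_neg hend]
        rw [show loopB (m+1) dig j 1 j = loopB m dig (j+1) 1 (j+1) from by
          rw [loopB, if_pos (by omega)]]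
        exact (IH m (by omega)).2 F' fuel dig (j+1) t (by omega) (by omega) (by omega)
          (by omega) hlen (fun l hl => hag l (by omega))
    · -- scan stops here: the carry lands at j, then dispatch like the top of A's loop
      rw [if_neg (by simp only [htj, beq_iff_eq]; exact h9)]
      show agreeR (loopA fuel (t.set j (t.getD j 0 + 1)) j j) (postB (loopB (m+1) dig j 1 j))
      rw [htj]
      have hjlen : j < t.length := by omega
      have hd' : (t.set j (dig.getD j 0 + 1)).getD j 0 = dig.getD j 0 + 1 := by
        rw [getD_set_eq, if_pos ⟨rfl, hjlen⟩]
      obtain ⟨f, rfl⟩ : ∃ f, fuel = f + 1 := ⟨fuel - 1, by omega⟩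
      rw [loopA, if_pos (by simp; omega), loopB]
      by_cases h4 : dig.getD j 0 + 1 ≤ 4
      · rw [if_pos (by rw [hd']; exact h4), if_neg (by omega)]
        refine (IH m (by omega)).1 f (dig.set j (dig.getD j 0 + 1)) (j+1) j
          (t.set j (dig.getD j 0 + 1)) (by simp; omega) (by omega) (by omega) (by simp; omega) ?_
        intro l hl
        rw [getD_set_eq, getD_set_eq, hlen]
        split_ifs with hset
        · rfl
        · exact hag l hl
      · rw [if_neg (by rw [hd']; exact h4)]
        by_cases hlast : (t.set j (dig.getD j 0 + 1)).length - 1 ≤ j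
        · have hll : t.length - 1 ≤ j := by simpa using hlast
          have hm0 : m = 0 := by omega
          subst hm0
          have hj1 : j + 1 = (t.set j (dig.getD j 0 + 1)).length := by simp; omega
          rw [if_pos hlast, if_pos (by omega), loopB, postB_one]
          rw [afterAppend f (t.set j (dig.getD j 0 + 1)) j (by omega) hj1 (by rw [hd']; omega)]
          have h := agree_append1 (t.set j (dig.getD j 0 + 1)) dig (by simp; omega)
          rwa [show (t.set j (dig.getD j 0 + 1)).length = j + 1 by simp; omega,
            show dig.length = j + 1 by omega] at h
        · rw [if_neg hlast, if_pos (by omega)]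
          have hm1 : 1 ≤ m := by simp only [List.length_set] at hlast; omega
          refine (IH m (by omega)).2 (t.set j (dig.getD j 0 + 1)).length f dig (j+1)
            (t.set j (dig.getD j 0 + 1)) (by omega) hm1 (by simp; omega) (by omega)
            (by simp; omega) ?_
          intro l hl
          rw [getD_set_eq, if_neg (by omega)]
          exact hag l (by omega)

-- ===== VERDICT (by name: the statement is the Claim_ definition above) =====
theorem solve_spec : Claim_equal_solve := by
  intro test _ _
  unfold Spec_solve
  have e1 : solve test = finalize (loopA (3 * (digitsOf test).length + 16) (digitsOf test) 0 0).1
      (loopA (3 * (digitsOf test).length + 16) (digitsOf test) 0 0).2 := rfl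
  have e2 : solve_alt test = finalize
      (if (loopB (digitsOf test).length (digitsOf test) 0 0 0).2.1 ≠ 0 then
        (loopB (digitsOf test).length (digitsOf test) 0 0 0).1 ++ [1]
       else (loopB (digitsOf test).length (digitsOf test) 0 0 0).1)
      (loopB (digitsOf test).length (digitsOf test) 0 0 0).2.2 := rfl
  rw [e1, e2]
  have h := (simAll (digitsOf test).length).1 (3 * (digitsOf test).length + 16)
    (digitsOf test) 0 0 (digitsOf test) (by omega) (by omega) (by omega) rfl (fun l _ => rfl)
  obtain ⟨hz, hlen, hD⟩ := h
  simp only [postB] at hz hlen hD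
  rw [hz]
  exact finalize_congr _ _ _ hlen (hz ▸ hD)
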